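-- pv_equiv track=rewrite | github.com/MethxMaster/Job-setup-V4.1 | handling_file.py | trim_xml_name
-- ===== SOURCE A (Python) =====
-- def trim_xml_name(str_input):
--
-- 	str_len = len(str_input)
--
-- 	running_num = 0
-- 	found_XML = 0
-- 	for i in str_input :
-- 		running_num += 1
-- 		if i == '\\' :
-- 			found_XML = running_num
--
--
-- 	return str_input[found_XML:str_len]
-- ===== SOURCE B (Python) =====
-- def trim_xml_name(str_input):
-- 	# scan backwards; at the first (i.e. last) backslash, return everything after it
-- 	for i in range(len(str_input) - 1, -1, -1):
-- 		if str_input[i] == '\\':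
-- 			return str_input[i + 1:]
-- 	return str_input
-- ===== Notes on version B (the rewrite author's own statement) =====
-- stated objective: simpler
-- what changed: B scans the string backwards by index and returns str_input[i+1:] at the first backslash it meets (early exit), instead of A's full forward scan that maintains a running position counter and slices at the end.
import Mathlib
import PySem

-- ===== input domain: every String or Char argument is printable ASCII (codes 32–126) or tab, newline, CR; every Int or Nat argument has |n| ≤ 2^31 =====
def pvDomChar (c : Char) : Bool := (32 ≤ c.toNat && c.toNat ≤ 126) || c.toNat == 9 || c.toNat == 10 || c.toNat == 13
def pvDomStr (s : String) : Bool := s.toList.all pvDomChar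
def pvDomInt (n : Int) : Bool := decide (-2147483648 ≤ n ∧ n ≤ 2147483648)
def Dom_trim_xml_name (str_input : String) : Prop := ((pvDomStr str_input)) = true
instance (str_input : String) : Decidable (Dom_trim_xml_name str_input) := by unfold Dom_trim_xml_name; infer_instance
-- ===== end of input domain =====

-- B replaces A's full forward scan with a backwards index scan that returns at the first backslash (simpler, early exit).

-- ===== PORT A =====
def trim_xml_name (str_input : String) : String :=
  let str_len : Int := PySem.Str.len str_input
  let st := str_input.toList.foldl
    (fun (p : Int × Int) (i : Char) =>
      let running_num := p.1 + 1
      (running_num, if i = '\\' then running_num else p.2))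
    ((0 : Int), (0 : Int))
  PySem.Str.slice str_input (some st.2) (some str_len)

-- ===== PORT B =====
-- loop 'for i in range(len-1, -1, -1)': argument is the number of indices still to inspect
def trimAltLoop (cs : List Char) : Nat → String
  | 0 => String.ofList cs
  | Nat.succ j => if cs.getD j ' ' = '\\' then String.ofList (cs.drop (j + 1)) else trimAltLoop cs j

def trim_xml_name_alt (str_input : String) : String :=
  trimAltLoop str_input.toList str_input.toList.length

-- ===== PRECONDITION & SPEC =====
def Spec_trim_xml_name (str_input : String) (out : String) : Prop := out = trim_xml_name_alt str_input
instance (str_input : String) (out : String) : Decidable (Spec_trim_xml_name str_input out) := by unfold Spec_trim_xml_name; infer_instance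

-- ===== CLAIM (what is proved, stated in full; the proofs are below) =====
def Claim_equal_trim_xml_name : Prop := ∀ (str_input : String), Dom_trim_xml_name str_input → Spec_trim_xml_name str_input (trim_xml_name str_input)

-- ===== LEMMAS AND PROOFS =====

def natStep (p : Nat × Nat) (c : Char) : Nat × Nat :=
  (p.1 + 1, if c = '\\' then p.1 + 1 else p.2)

def foundN (cs : List Char) : Nat := (cs.foldl natStep (0, 0)).2

theorem fst_natFold (cs : List Char) : ∀ n f : Nat, (cs.foldl natStep (n, f)).1 = n + cs.length := by
  induction cs with
  | nil => intro n f; simp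
  | cons c cs ih => intro n f; simp only [List.foldl_cons, natStep, List.length_cons]; rw [ih]; omega

theorem snd_natFold_le (cs : List Char) : ∀ n f : Nat, f ≤ n → (cs.foldl natStep (n, f)).2 ≤ (cs.foldl natStep (n, f)).1 := by
  induction cs with
  | nil => intro n f h; simpa using h
  | cons c cs ih =>
      intro n f h
      simp only [List.foldl_cons, natStep]
      split <;> exact ih _ _ (by omega)

theorem foundN_le (cs : List Char) : foundN cs ≤ cs.length := by
  have h := snd_natFold_le cs 0 0 (le_refl _)
  rw [fst_natFold] at h
  simpa [foundN] using h

theorem foundN_append (xs : List Char) (c : Char) :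
    foundN (xs ++ [c]) = if c = '\\' then xs.length + 1 else foundN xs := by
  simp only [foundN, List.foldl_append, List.foldl_cons, List.foldl_nil, natStep]
  rw [fst_natFold]
  split <;> simp

theorem intFold_eq_natFold (cs : List Char) : ∀ n f : Nat,
    cs.foldl (fun (p : Int × Int) (i : Char) =>
        let running_num := p.1 + 1
        (running_num, if i = '\\' then running_num else p.2)) ((n : Int), (f : Int))
      = (((cs.foldl natStep (n, f)).1 : Int), ((cs.foldl natStep (n, f)).2 : Int)) := by
  induction cs with
  | nil => intro n f; simp
  | cons c cs ih =>
      intro n f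
      simp only [List.foldl_cons, natStep]
      by_cases hc : c = '\\' <;> simp only [hc, if_true, if_false] <;>
        [skip; skip] <;> first
        | (show _ = _ ; rw [show ((n : Int) + 1) = ((n + 1 : Nat) : Int) by push_cast; ring]; exact ih (n + 1) (n + 1))
        | (rw [show ((n : Int) + 1) = ((n + 1 : Nat) : Int) by push_cast; ring]; exact ih (n + 1) f)

theorem trimAltLoop_eq (cs : List Char) : ∀ i, i ≤ cs.length →
    trimAltLoop cs i = String.ofList (cs.drop (foundN (cs.take i))) := by
  intro i
  induction i with
  | zero => intro _; simp [trimAltLoop, foundN, List.foldl_nil]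
  | succ j ih =>
      intro hle
      have hj : j < cs.length := by omega
      have htake : cs.take (j + 1) = cs.take j ++ [cs[j]] := by
        rw [List.take_add_one]; simp [List.getElem?_eq_getElem hj]
      have hget : cs.getD j ' ' = cs[j] := by
        simp [List.getD, List.getElem?_eq_getElem hj]
      rw [trimAltLoop, htake, foundN_append, hget]
      by_cases hc : cs[j] = '\\'
      · simp [hc, Nat.min_eq_left hj.le]
      · simp only [hc, if_false]
        exact ih (by omega)

theorem alt_eq_drop (s : String) :
    trim_xml_name_alt s = String.ofList (s.toList.drop (foundN s.toList)) := by
  rw [trim_xml_name_alt, trimAltLoop_eq _ _ (le_refl _), List.take_length]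

theorem a_eq_drop (s : String) :
    trim_xml_name s = String.ofList (s.toList.drop (foundN s.toList)) := by
  have hfold := intFold_eq_natFold s.toList 0 0
  have hle := foundN_le s.toList
  simp only [trim_xml_name]
  rw [show ((0 : Int), (0 : Int)) = (((0 : Nat) : Int), ((0 : Nat) : Int)) by norm_num, hfold]
  have hlen : PySem.Str.len s = (s.toList.length : Int) := by
    simp [PySem.Str.len_eq]
  apply String.toList_injective
  rw [PySem.Str.toList_slice, PySem.Chars.slice_eq_listSlice]
  simp only [hlen]
  have : (s.toList.foldl natStep (0, 0)).2 = foundN s.toList := rfl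
  rw [this, PySem.List.slice_natCast]
  have hdl : (s.toList.drop (foundN s.toList)).length = s.toList.length - foundN s.toList :=
    List.length_drop ..
  rw [List.take_of_length_le (by omega)]
  simp

-- ===== VERDICT (by name: the statement is the Claim_ definition above) =====
theorem trim_xml_name_spec : Claim_equal_trim_xml_name := by
  intro s _
  unfold Spec_trim_xml_name
  rw [a_eq_drop, alt_eq_drop]
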